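-- pv_equiv track=rewrite | github.com/francisdbillones/MockBot | bot.py | mock
-- ===== SOURCE A (Python) =====
-- def getPureText(string):
-- 	words = string.split()
-- 	result = ""
-- 	for i, word in enumerate(words):
-- 		if word[0] != '@' and word[0:4] != 'http':
-- 			result += word + " "
-- 	return result
--
-- def mock(string):
-- 	words = getPureText(string).split()
--
-- 	result = ''
-- 	for i, word in enumerate(words):
-- 		mocked_text = ''
-- 		for j, char in enumerate(word):
-- 			mocked_text += (char.lower() if j % 2 == 0 else char.upper())
-- 		words[i] = mocked_text
-- 	return ' '.join(words)
-- ===== SOURCE B (Python) =====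
-- def mock(string):
-- 	kept = []
-- 	for w in string.split():
-- 		if not w.startswith('@') and not w.startswith('http'):
-- 			kept.append(''.join(c.upper() if i % 2 else c.lower() for i, c in enumerate(w)))
-- 	return ' '.join(kept)
-- ===== Notes on version B (the rewrite author's own statement) =====
-- stated objective: simpler
-- what changed: Single pass over string.split() with startswith guards and a list of mocked words joined once, instead of A's build-a-filtered-string-with-trailing-spaces, re-split it, and mutate the word list in place.
import Mathlib
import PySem

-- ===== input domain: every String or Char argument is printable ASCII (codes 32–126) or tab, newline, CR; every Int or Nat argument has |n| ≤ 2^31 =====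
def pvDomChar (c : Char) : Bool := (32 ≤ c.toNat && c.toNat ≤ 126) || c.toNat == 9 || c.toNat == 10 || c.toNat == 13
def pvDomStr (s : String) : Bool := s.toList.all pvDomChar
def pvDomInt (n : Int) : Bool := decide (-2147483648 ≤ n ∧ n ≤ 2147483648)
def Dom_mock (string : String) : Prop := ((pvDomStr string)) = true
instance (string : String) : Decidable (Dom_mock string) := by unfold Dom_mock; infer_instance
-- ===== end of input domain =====

-- B replaces A's build-filtered-string / re-split / mutate-the-word-list pipeline by one pass
-- that filters with startswith and joins the mocked words once (objective: simpler).

-- ===== PORT A =====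
-- getPureText: keep words, rebuild a string with a trailing space after each kept word
def getPureText (s : List Char) : List Char :=
  let words := PySem.Chars.split₀ s
  words.foldl (fun result word =>
    if (PySem.List.pyGet? word 0 != some '@')
        && (PySem.List.slice word (some 0) (some 4) != "http".toList)
    then result ++ (word ++ [' ']) else result) []

-- A's inner per-word loop: build mocked_text char by char
def mockWordA (word : List Char) : List Char :=
  (PySem.List.enumerate word).foldl (fun mocked jc =>
    mocked ++ [if PySem.Int.mod jc.1 2 == 0 then PySem.Chars.lowerChar jc.2 else PySem.Chars.upperChar jc.2]) []

def mock (string : String) : String :=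
  let words := PySem.Chars.split₀ (getPureText string.toList)
  String.ofList (PySem.Chars.join [' '] (words.map mockWordA))

-- ===== PORT B =====
def mockWordB (word : List Char) : List Char :=
  (PySem.List.enumerate word).map (fun ic =>
    if PySem.Int.mod ic.1 2 != 0 then PySem.Chars.upperChar ic.2 else PySem.Chars.lowerChar ic.2)

def mock_alt (string : String) : String :=
  String.ofList (PySem.Chars.join [' ']
    (((PySem.Chars.split₀ string.toList).filter (fun w =>
        !(PySem.Chars.startswith w ['@']) && !(PySem.Chars.startswith w "http".toList))).map
      mockWordB))

-- ===== PRECONDITION & SPEC =====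
def Spec_mock (string : String) (out : String) : Prop := out = mock_alt string
instance (string : String) (out : String) : Decidable (Spec_mock string out) := by unfold Spec_mock; infer_instance

-- ===== CLAIM (what is proved, stated in full; the proofs are below) =====
def Claim_equal_mock : Prop := ∀ (string : String), Dom_mock string → Spec_mock string (mock string)

-- ===== LEMMAS AND PROOFS =====

-- a "good" word: nonempty and whitespace-free (what str.split() produces)
def GoodWord (w : List Char) : Prop := w ≠ [] ∧ ∀ c ∈ w, PySem.Chars.isspace c = false

lemma go_nonspace (w : List Char) (hw : ∀ c ∈ w, PySem.Chars.isspace c = false) :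
    ∀ (rest : List Char) (cur : List Char) (acc : List (List Char)),
      PySem.Chars.split₀.go (w ++ rest) cur acc
        = PySem.Chars.split₀.go rest (w.reverse ++ cur) acc := by
  induction w with
  | nil => intro rest cur acc; simp
  | cons c t ih =>
      intro rest cur acc
      have hc : PySem.Chars.isspace c = false := hw c (by simp)
      have ht : ∀ x ∈ t, PySem.Chars.isspace x = false := fun x hx => hw x (by simp [hx])
      rw [List.cons_append, PySem.Chars.split₀.go, if_neg (by simp [hc]), ih ht]
      simp

lemma go_flat : ∀ (ws : List (List Char)) (acc : List (List Char)),
    (∀ w ∈ ws, GoodWord w) →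
    PySem.Chars.split₀.go (ws.flatMap (fun w => w ++ [' '])) [] acc = acc.reverse ++ ws := by
  intro ws
  induction ws with
  | nil => intro acc _; simp [PySem.Chars.split₀.go]
  | cons w ws ih =>
      intro acc h
      have hw : GoodWord w := h w (by simp)
      have hws : ∀ v ∈ ws, GoodWord v := fun v hv => h v (by simp [hv])
      have hflat : (w :: ws).flatMap (fun w => w ++ [' '])
          = w ++ (' ' :: ws.flatMap (fun w => w ++ [' '])) := by simp
      rw [hflat, go_nonspace w hw.2]
      rw [PySem.Chars.split₀.go, if_pos (by decide)]
      rw [if_neg (by simp [List.isEmpty_iff, hw.1])]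
      simp only [List.append_nil, List.reverse_reverse]
      rw [ih (w :: acc) hws]
      simp

lemma go_good : ∀ (s : List Char) (cur : List Char) (acc : List (List Char)),
    (∀ c ∈ cur, PySem.Chars.isspace c = false) →
    (∀ w ∈ acc, GoodWord w) →
    ∀ w ∈ PySem.Chars.split₀.go s cur acc, GoodWord w := by
  intro s
  induction s with
  | nil =>
      intro cur acc hcur hacc w hw
      rw [PySem.Chars.split₀.go] at hw
      split at hw
      · exact hacc w (by simpa using hw)
      · rename_i hne
        simp only [List.mem_reverse, List.mem_cons] at hw
        rcases hw with h | h
        · subst h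
          refine ⟨by simpa [List.isEmpty_iff] using hne, ?_⟩
          intro c hc; exact hcur c (by simpa using hc)
        · exact hacc w h
  | cons c rest ih =>
      intro cur acc hcur hacc w hw
      rw [PySem.Chars.split₀.go] at hw
      split at hw
      · rename_i hsp
        split at hw
        · exact ih [] acc (by simp) hacc w hw
        · rename_i hne
          refine ih [] (cur.reverse :: acc) (by simp) ?_ w hw
          intro v hv
          rcases List.mem_cons.mp hv with h | h
          · subst h
            refine ⟨by simpa [List.isEmpty_iff] using hne, ?_⟩
            intro x hx; exact hcur x (by simpa using hx)
          · exact hacc v h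
      · rename_i hsp
        refine ih (c :: cur) acc ?_ hacc w hw
        intro x hx
        rcases List.mem_cons.mp hx with h | h
        · subst h; simpa using hsp
        · exact hcur x h

lemma split₀_good (s : List Char) : ∀ w ∈ PySem.Chars.split₀ s, GoodWord w := by
  intro w hw
  exact go_good s [] [] (by simp) (by simp) w hw

lemma split₀_flatMap (ws : List (List Char)) (h : ∀ w ∈ ws, GoodWord w) :
    PySem.Chars.split₀ (ws.flatMap (fun w => w ++ [' '])) = ws := by
  unfold PySem.Chars.split₀
  simpa using go_flat ws [] h

-- A's guard equals B's startswith guard on nonempty words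
lemma guard_eq (w : List Char) (hw : w ≠ []) :
    ((PySem.List.pyGet? w 0 != some '@')
      && (PySem.List.slice w (some 0) (some 4) != "http".toList))
    = (!(PySem.Chars.startswith w ['@']) && !(PySem.Chars.startswith w "http".toList)) := by
  have hslice : PySem.List.slice w (some 0) (some 4) = w.take 4 := by
    have := PySem.List.slice_natCast w 0 4
    simpa using this
  apply Bool.eq_iff_iff.mpr
  cases w with
  | nil => exact absurd rfl hw
  | cons c t =>
      simp only [Bool.and_eq_true, bne_iff_ne, Bool.not_eq_true',
        ← Bool.not_eq_true, PySem.Chars.startswith_iff, hslice]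
      constructor
      · rintro ⟨h1, h2⟩
        constructor
        · intro hpre
          have hc : c = '@' := ((List.cons_prefix_cons.mp hpre).1).symm
          exact h1 (by simp [PySem.List.pyGet?, PySem.List.pyIdx?, hc])
        · intro hpre
          exact h2 ((List.prefix_iff_eq_take.mp hpre).symm)
      · rintro ⟨h1, h2⟩
        refine ⟨?_, ?_⟩
        · intro hget
          apply h1
          have : c = '@' := by
            have h := hget
            simp [PySem.List.pyGet?, PySem.List.pyIdx?] at h
            exact h
          simp [this]
        · intro htake
          apply h2
          exact List.prefix_iff_eq_take.mpr (by simpa using htake.symm)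

lemma flatMap_ite {α β : Type} (p : α → Bool) (g : α → List β) :
    ∀ l : List α, l.flatMap (fun x => if p x then g x else []) = (l.filter p).flatMap g := by
  intro l
  induction l with
  | nil => simp
  | cons x xs ih =>
      by_cases h : p x <;> simp [h, ih]

lemma getPureText_eq (s : List Char) :
    getPureText s
      = ((PySem.Chars.split₀ s).filter (fun w =>
          !(PySem.Chars.startswith w ['@']) && !(PySem.Chars.startswith w "http".toList))).flatMap
        (fun w => w ++ [' ']) := by
  unfold getPureText
  have hcong : ∀ acc, (PySem.Chars.split₀ s).foldl (fun result word =>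
      if (PySem.List.pyGet? word 0 != some '@')
          && (PySem.List.slice word (some 0) (some 4) != "http".toList)
      then result ++ (word ++ [' ']) else result) acc
      = (PySem.Chars.split₀ s).foldl (fun result word =>
      result ++ (if !(PySem.Chars.startswith word ['@'])
                    && !(PySem.Chars.startswith word "http".toList)
                 then word ++ [' '] else [])) acc := by
    intro acc
    apply PySem.List.foldl_congr_mem
    intro acc' w hw
    rw [guard_eq w (split₀_good s w hw).1]
    split <;> simp
  rw [hcong, PySem.List.foldl_append_eq_flatMap]
  simp only [List.nil_append]
  exact flatMap_ite _ _ _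

lemma mockWord_eq (w : List Char) : mockWordA w = mockWordB w := by
  unfold mockWordA mockWordB
  rw [PySem.List.foldl_append_singleton_eq_map]
  simp only [List.nil_append]
  apply List.map_congr_left
  intro jc _
  have he : PySem.Int.mod jc.1 2 = jc.1 % 2 := PySem.Int.mod_eq_emod_of_pos (by norm_num)
  rcases Int.emod_two_eq jc.1 with h | h
  · simp [he, h]
  · simp [h]

-- ===== VERDICT (by name: the statement is the Claim_ definition above) =====
theorem mock_spec : Claim_equal_mock := by
  intro s _
  unfold Spec_mock mock mock_alt
  rw [getPureText_eq,
    split₀_flatMap _ (fun w hw => split₀_good s.toList w (List.mem_of_mem_filter hw)),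
    funext mockWord_eq]
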